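-- pv_equiv track=rewrite | github.com/TreyMillerDev/Assignment3 | datadump.py | alpha_sort
-- ===== SOURCE A (Python) =====
-- def alpha_sort(random_dict):
--     alpha_sorted_dict = {}
--     starting_letter = 'a'
--     for key, value in random_dict.items():
--         if key[0] == starting_letter and starting_letter not in alpha_sorted_dict: # we havent hit that letter yet
--             alpha_sorted_dict[starting_letter] = {key:value}
--         elif key[0] == starting_letter: # letter already exists
--             alpha_sorted_dict[starting_letter][key] = value
--         else: # we have a different letter
--             starting_letter = key[0] # update the letter
--             if key[0] == starting_letter and starting_letter not in alpha_sorted_dict: # we havent hit that letter yet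
--                 alpha_sorted_dict[starting_letter] = {key:value}
--             elif key[0] == starting_letter: # letter already exists
--                 alpha_sorted_dict[starting_letter][key] = value
--     random_dict = {} # empty our old container
--     return alpha_sorted_dict # return the newly sorted containr
-- ===== SOURCE B (Python) =====
-- def alpha_sort(random_dict):
--     letters = []
--     for key in random_dict:
--         if key[0] not in letters:
--             letters.append(key[0])
--     return {letter: {k: v for k, v in random_dict.items() if k[0] == letter}
--             for letter in letters}
-- ===== Notes on version B (the rewrite author's own statement) =====
-- stated objective: alternative
-- what changed: A's single stateful pass (tracking the current starting_letter and growing a dict of dicts as it goes) is replaced by first building an ordered index of distinct first letters and then building each letter's inner dict with a separate filtering scan over the input.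
import Mathlib
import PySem

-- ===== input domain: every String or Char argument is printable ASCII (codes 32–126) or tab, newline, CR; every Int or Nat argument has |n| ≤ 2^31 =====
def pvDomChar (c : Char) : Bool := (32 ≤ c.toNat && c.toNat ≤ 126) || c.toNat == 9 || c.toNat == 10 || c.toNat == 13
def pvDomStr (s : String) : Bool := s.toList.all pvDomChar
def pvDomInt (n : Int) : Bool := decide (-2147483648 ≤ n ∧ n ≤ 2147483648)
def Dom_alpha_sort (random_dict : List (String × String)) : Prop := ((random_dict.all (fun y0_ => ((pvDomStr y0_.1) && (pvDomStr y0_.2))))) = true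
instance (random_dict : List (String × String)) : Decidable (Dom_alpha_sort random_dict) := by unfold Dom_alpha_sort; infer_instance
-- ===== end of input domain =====

-- B replaces A's single stateful grouping pass (running current-letter + grouped dict) by a
-- first-appearance letter index built first, then one filtering scan per letter (objective: alternative).


-- ===== PORT A =====
-- state: (alpha_sorted_dict, starting_letter); key[0] is PySem.Str.pyGet? (none = IndexError,
-- excluded by Pre_, state kept unchanged there)
def alpha_sort (random_dict : List (String × String)) : List (String × List (String × String)) :=
  let final :=
    random_dict.foldl (fun st kv =>
      match PySem.Str.pyGet? kv.1 0 with
      | none => st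
      | some c =>
        let ks : String := String.mk [c]
        let d := st.1
        let sl := st.2
        if ks == sl && !(d.contains sl) then          -- we havent hit that letter yet
          (d.insert sl (PySem.Dict.ofList [(kv.1, kv.2)]), sl)
        else if ks == sl then                          -- letter already exists
          (d.modify sl PySem.Dict.empty (fun inner => inner.insert kv.1 kv.2), sl)
        else                                           -- a different letter: update it
          let sl := ks
          if ks == sl && !(d.contains sl) then
            (d.insert sl (PySem.Dict.ofList [(kv.1, kv.2)]), sl)
          else                                         -- the elif guard 'ks == sl' is now True
            (d.modify sl PySem.Dict.empty (fun inner => inner.insert kv.1 kv.2), sl))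
      ((PySem.Dict.empty : PySem.Dict String (PySem.Dict String String)), "a")
  final.1.items.map (fun p => (p.1, p.2.items))

-- ===== PORT B =====
-- letters = ordered list of distinct first letters; then one dict comprehension per letter
def alpha_sort_alt (random_dict : List (String × String)) : List (String × List (String × String)) :=
  let letters := random_dict.foldl (fun acc kv =>
      match PySem.Str.pyGet? kv.1 0 with
      | none => acc
      | some c => let l := String.mk [c]; if acc.contains l then acc else acc ++ [l])
    ([] : List String)
  letters.map (fun letter =>
    (letter, (PySem.Dict.ofList (random_dict.filter (fun kv =>
        match PySem.Str.pyGet? kv.1 0 with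
        | none => false
        | some c => String.mk [c] == letter))).items))

-- ===== PRECONDITION & SPEC =====
-- Pre_ excludes inputs having a key of no characters: indexing its first character raises IndexError in A and in B.
def Pre_alpha_sort (random_dict : List (String × String)) : Prop :=
  ∀ p ∈ random_dict, p.1 ≠ ""
instance (random_dict : List (String × String)) : Decidable (Pre_alpha_sort random_dict) := by
  unfold Pre_alpha_sort; infer_instance
def pvWitness_alpha_sort : (List (String × String)) :=
  [("apple", "1"), ("banana", "2"), ("art", "3"), ("bob", "4")]
def Spec_alpha_sort (random_dict : List (String × String)) (out : List (String × List (String × String))) : Prop := out = alpha_sort_alt random_dict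
instance (random_dict : List (String × String)) (out : List (String × List (String × String))) : Decidable (Spec_alpha_sort random_dict out) := by unfold Spec_alpha_sort; infer_instance

-- ===== CLAIM (what is proved, stated in full; the proofs are below) =====
def Claim_equal_alpha_sort : Prop := ∀ (random_dict : List (String × String)), Dom_alpha_sort random_dict → Pre_alpha_sort random_dict → Spec_alpha_sort random_dict (alpha_sort random_dict)

-- ===== LEMMAS AND PROOFS =====

-- the (optional) first letter of an entry's key, as a one-char string
def pvLh (kv : String × String) : Option String :=
  (PySem.Str.pyGet? kv.1 0).map (fun c => String.mk [c])

-- A's loop body, named (definitionally the lambda inside alpha_sort)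
def pvStepA (st : PySem.Dict String (PySem.Dict String String) × String) (kv : String × String) :
    PySem.Dict String (PySem.Dict String String) × String :=
  match PySem.Str.pyGet? kv.1 0 with
  | none => st
  | some c =>
    let ks : String := String.mk [c]
    let d := st.1
    let sl := st.2
    if ks == sl && !(d.contains sl) then
      (d.insert sl (PySem.Dict.ofList [(kv.1, kv.2)]), sl)
    else if ks == sl then
      (d.modify sl PySem.Dict.empty (fun inner => inner.insert kv.1 kv.2), sl)
    else
      let sl := ks
      if ks == sl && !(d.contains sl) then
        (d.insert sl (PySem.Dict.ofList [(kv.1, kv.2)]), sl)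
      else
        (d.modify sl PySem.Dict.empty (fun inner => inner.insert kv.1 kv.2), sl)

-- canonical grouping step: A's step with the starting_letter bookkeeping stripped
def pvStepG (d : PySem.Dict String (PySem.Dict String String)) (kv : String × String) :
    PySem.Dict String (PySem.Dict String String) :=
  match pvLh kv with
  | none => d
  | some l => d.modify l PySem.Dict.empty (fun inner => inner.insert kv.1 kv.2)

-- B's letter-collecting step, named (definitionally the first lambda inside alpha_sort_alt)
def pvStepL (acc : List String) (kv : String × String) : List String :=
  match PySem.Str.pyGet? kv.1 0 with
  | none => acc
  | some c => let l := String.mk [c]; if acc.contains l then acc else acc ++ [l]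

theorem pvStepA_fst (st : PySem.Dict String (PySem.Dict String String) × String)
    (kv : String × String) : (pvStepA st kv).1 = pvStepG st.1 kv := by
  obtain ⟨d, sl⟩ := st
  unfold pvStepA pvStepG pvLh
  cases h : PySem.Str.pyGet? kv.1 0 with
  | none => simp
  | some c =>
    simp only [Option.map_some]
    have key : ∀ (d : PySem.Dict String (PySem.Dict String String)),
        d.contains (String.mk [c]) = false →
        d.insert (String.mk [c]) (PySem.Dict.ofList [(kv.1, kv.2)])
          = d.modify (String.mk [c]) PySem.Dict.empty (fun inner => inner.insert kv.1 kv.2) := by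
      intro d hc
      show _ = d.insert (String.mk [c]) ((d.getD (String.mk [c]) PySem.Dict.empty).insert kv.1 kv.2)
      rw [PySem.Dict.getD_of_not_contains d PySem.Dict.empty hc]
      rfl
    by_cases hsl : String.mk [c] = sl
    · subst hsl
      by_cases hc : d.contains (String.mk [c]) = true
      · simp [hc]
      · simp only [Bool.not_eq_true] at hc
        simp only [BEq.rfl, hc, Bool.not_false, Bool.and_true, if_true]
        exact key d hc
    · have hbeq : (String.mk [c] == sl) = false := by simp [hsl]
      by_cases hc : d.contains (String.mk [c]) = true
      · simp [hbeq, hc]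
      · simp only [Bool.not_eq_true] at hc
        simp only [hbeq, Bool.false_and, BEq.rfl, hc, Bool.not_false,
          Bool.and_true, if_true]
        exact key d hc

theorem pv_foldA_eq_foldG (rd : List (String × String))
    (st : PySem.Dict String (PySem.Dict String String) × String) :
    (rd.foldl pvStepA st).1 = rd.foldl pvStepG st.1 := by
  induction rd generalizing st with
  | nil => rfl
  | cons kv rest ih =>
    simp only [List.foldl_cons]
    rw [ih, pvStepA_fst]

theorem pv_keys_foldG (rd : List (String × String))
    (d : PySem.Dict String (PySem.Dict String String)) :
    (rd.foldl pvStepG d).keys = rd.foldl pvStepL d.keys := by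
  induction rd generalizing d with
  | nil => rfl
  | cons kv rest ih =>
    simp only [List.foldl_cons]
    rw [ih]
    congr 1
    unfold pvStepG pvStepL pvLh
    cases h : PySem.Str.pyGet? kv.1 0 with
    | none => simp
    | some c =>
      simp only [Option.map_some]
      rw [PySem.Dict.keys_modify]
      by_cases hc : d.contains (String.mk [c]) = true
      · rw [PySem.Dict.keys_insert_of_contains d _ hc]
        have hmem : String.mk [c] ∈ d.keys := (PySem.Dict.contains_iff_mem_keys d _).mp hc
        simp [hmem]
      · simp only [Bool.not_eq_true] at hc
        rw [PySem.Dict.keys_insert_of_not_contains d _ hc]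
        have hmem : String.mk [c] ∉ d.keys := fun hm =>
          absurd ((PySem.Dict.contains_iff_mem_keys d _).mpr hm) (by simp [hc])
        simp [hmem]

theorem pv_nodup_keys_foldG (rd : List (String × String))
    (d : PySem.Dict String (PySem.Dict String String)) (hd : d.keys.Nodup) :
    (rd.foldl pvStepG d).keys.Nodup := by
  induction rd generalizing d with
  | nil => exact hd
  | cons kv rest ih =>
    simp only [List.foldl_cons]
    apply ih
    unfold pvStepG pvLh
    cases h : PySem.Str.pyGet? kv.1 0 with
    | none => simpa using hd
    | some c =>
      simp only [Option.map_some]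
      rw [PySem.Dict.keys_modify]
      by_cases hc : d.contains (String.mk [c]) = true
      · rw [PySem.Dict.keys_insert_of_contains d _ hc]; exact hd
      · simp only [Bool.not_eq_true] at hc
        rw [PySem.Dict.keys_insert_of_not_contains d _ hc]
        refine List.Nodup.append hd (List.nodup_singleton _) ?_
        intro x hx hx'
        simp only [List.mem_singleton] at hx'
        subst hx'
        exact absurd ((PySem.Dict.contains_iff_mem_keys d _).mpr hx) (by simp [hc])

theorem pv_getD_foldG (rd : List (String × String))
    (d : PySem.Dict String (PySem.Dict String String)) (l : String) :
    (rd.foldl pvStepG d).getD l PySem.Dict.empty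
      = (rd.filter (fun kv => pvLh kv == some l)).foldl
          (fun inner kv => inner.insert kv.1 kv.2) (d.getD l PySem.Dict.empty) := by
  induction rd generalizing d with
  | nil => rfl
  | cons kv rest ih =>
    simp only [List.foldl_cons, List.filter_cons]
    cases h : pvLh kv with
    | none =>
      have hstep : pvStepG d kv = d := by unfold pvStepG; rw [h]
      rw [hstep, if_neg (show ¬(((none : Option String) == some l) = true) by simp)]
      exact ih d
    | some l' =>
      have hstep : pvStepG d kv
          = d.modify l' PySem.Dict.empty (fun inner => inner.insert kv.1 kv.2) := by
        unfold pvStepG; rw [h]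
      by_cases hl : l' = l
      · subst hl
        rw [hstep, if_pos (show ((some l' : Option String) == some l') = true by simp),
          ih, List.foldl_cons, PySem.Dict.getD_modify]
        simp
      · rw [hstep, if_neg (show ¬(((some l' : Option String) == some l) = true) by simp [hl]),
          ih, PySem.Dict.getD_modify]
        simp [Ne.symm hl]

-- ===== VERDICT (by name: the statement is the Claim_ definition above) =====
theorem alpha_sort_spec : Claim_equal_alpha_sort := by
  intro rd _ _
  unfold Spec_alpha_sort alpha_sort alpha_sort_alt
  have hA : (rd.foldl pvStepA
      ((PySem.Dict.empty : PySem.Dict String (PySem.Dict String String)), "a")).1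
      = rd.foldl pvStepG PySem.Dict.empty := pv_foldA_eq_foldG rd _
  show (rd.foldl pvStepA ((PySem.Dict.empty : PySem.Dict String (PySem.Dict String String)), "a")).1.items.map
      (fun p => (p.1, p.2.items)) = _
  rw [hA]
  have hnodup : (rd.foldl pvStepG (PySem.Dict.empty :
      PySem.Dict String (PySem.Dict String String))).keys.Nodup :=
    pv_nodup_keys_foldG rd _ PySem.Dict.nodup_keys_empty
  rw [PySem.Dict.items_eq_map_keys _ hnodup PySem.Dict.empty]
  rw [pv_keys_foldG]
  show ((rd.foldl pvStepL PySem.Dict.empty.keys).map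
      (fun k => (k, (rd.foldl pvStepG PySem.Dict.empty).getD k PySem.Dict.empty))).map
      (fun p => (p.1, p.2.items))
    = (rd.foldl pvStepL ([] : List String)).map _
  rw [List.map_map]
  apply List.map_congr_left
  intro l _
  simp only [Function.comp]
  rw [pv_getD_foldG]
  have hfilter : rd.filter (fun kv => pvLh kv == some l)
      = rd.filter (fun kv =>
          match PySem.Str.pyGet? kv.1 0 with
          | none => false
          | some c => String.mk [c] == l) := by
    apply List.filter_congr
    intro kv _
    unfold pvLh
    cases PySem.Str.pyGet? kv.1 0 <;> simp
  rw [hfilter]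
  rfl
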